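-- pv_equiv track=rewrite | github.com/Panicgrinder/novapolis-suite | novapolis-agent/scripts/export_finetune.py | _first_user_message
-- ===== SOURCE A (Python) =====
-- from typing import Any, Dict, List, Optional, Tuple, cast
--
-- def _first_user_message(messages: List[Dict[str, str]]) -> Tuple[str, str]:
--     """Liefert (instruction, input)."""
--     if not messages:
--         return ("", "")
--     # Nimm die erste user-Nachricht als Instruction,
--     # alles andere (weitere user/assistant/system) wird als Input zusammengefasst
--     instruction = ""
--     others: List[str] = []
--     for m in messages:
--         role = m.get("role")
--         content = m.get("content", "")
--         if instruction == "" and role == "user":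
--             instruction = content
--         else:
--             if content:
--                 others.append(content)
--     return (instruction, "\n\n".join(others))
-- ===== SOURCE B (Python) =====
-- from typing import Dict, List, Optional, Tuple
--
-- def _first_user_message(messages: List[Dict[str, str]]) -> Tuple[str, str]:
--     contents = [m.get("content", "") for m in messages]
--     hit = next(((i, c) for i, (m, c) in enumerate(zip(messages, contents))
--                 if m.get("role") == "user" and c), None)
--     idx, instruction = hit if hit is not None else (None, "")
--     others = [c for i, c in enumerate(contents) if c and i != idx]
--     return (instruction, "\n\n".join(others))
-- ===== Notes on version B (the rewrite author's own statement) =====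
-- stated objective: simpler
-- what changed: Replaces A's stateful loop (mutable instruction flag plus others accumulator with an in-loop branch) by a direct decomposition: compute the index of the first user message with truthy content, take its content as instruction, and collect every other truthy content by comprehension; the redundant empty-list early return disappears.
import Mathlib
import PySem

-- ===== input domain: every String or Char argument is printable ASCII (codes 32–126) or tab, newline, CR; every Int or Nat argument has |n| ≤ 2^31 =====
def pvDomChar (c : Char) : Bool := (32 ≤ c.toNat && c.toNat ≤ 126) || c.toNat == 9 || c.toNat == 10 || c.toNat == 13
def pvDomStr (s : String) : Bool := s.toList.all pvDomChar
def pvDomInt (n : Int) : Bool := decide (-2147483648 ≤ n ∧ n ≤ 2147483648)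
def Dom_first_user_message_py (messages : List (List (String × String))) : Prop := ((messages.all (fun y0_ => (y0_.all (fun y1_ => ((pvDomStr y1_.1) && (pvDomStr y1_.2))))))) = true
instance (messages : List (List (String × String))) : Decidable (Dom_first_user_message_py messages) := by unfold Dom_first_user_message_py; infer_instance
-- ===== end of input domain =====

-- B replaces A's stateful instruction/others loop by a single index computation (first
-- user message with truthy content) plus comprehensions; objective: simpler decomposition.

-- shared dict primitive: m.get(k) / m.get(k, dflt) on an association list (first match)
def pvDictGet? (m : List (String × String)) (k : String) : Option String :=
  (m.find? (fun p => p.1 == k)).map (·.2)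

def pvDictGetD (m : List (String × String)) (k : String) (dflt : String) : String :=
  (pvDictGet? m k).getD dflt

-- ===== PORT A =====
def pvStepA (st : String × List String) (m : List (String × String)) : String × List String :=
  let role := pvDictGet? m "role"
  let content := pvDictGetD m "content" ""
  if st.1 = "" ∧ role = some "user" then (content, st.2)
  else if content ≠ "" then (st.1, st.2 ++ [content]) else st

def first_user_message_py (messages : List (List (String × String))) : String × String :=
  if messages = [] then ("", "")
  else
    let st := messages.foldl pvStepA ("", [])
    (st.1, PySem.Str.join "\n\n" st.2)

-- ===== PORT B =====
def first_user_message_py_alt (messages : List (List (String × String))) : String × String :=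
  let contents := messages.map (fun m => pvDictGetD m "content" "")
  let hit := (PySem.List.enumerate (messages.zip contents)).find?
      (fun p => (pvDictGet? p.2.1 "role" == some "user") && (p.2.2 != ""))
  let idx : Option Int := hit.map (·.1)
  let instruction := (hit.map (·.2.2)).getD ""
  let others := (PySem.List.enumerate contents).filterMap
      (fun p => if p.2 ≠ "" ∧ some p.1 ≠ idx then some p.2 else none)
  (instruction, PySem.Str.join "\n\n" others)

-- ===== PRECONDITION & SPEC =====
def Spec_first_user_message_py (messages : List (List (String × String))) (out : String × String) : Prop := out = first_user_message_py_alt messages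
instance (messages : List (List (String × String))) (out : String × String) : Decidable (Spec_first_user_message_py messages out) := by unfold Spec_first_user_message_py; infer_instance

-- ===== CLAIM (what is proved, stated in full; the proofs are below) =====
def Claim_equal_first_user_message_py : Prop := ∀ (messages : List (List (String × String))), Dom_first_user_message_py messages → Spec_first_user_message_py messages (first_user_message_py messages)

-- ===== LEMMAS AND PROOFS =====

-- once the instruction is non-empty, A just appends every truthy content
lemma foldA_of_ne (msgs : List (List (String × String))) :
    ∀ (ins : String) (acc : List String), ins ≠ "" →
    msgs.foldl pvStepA (ins, acc)
      = (ins, acc ++ (msgs.map (fun m => pvDictGetD m "content" "")).filter (fun c => c ≠ "")) := by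
  induction msgs with
  | nil => intro ins acc h; simp
  | cons m ms ih =>
    intro ins acc h
    simp only [List.foldl_cons, List.map_cons, List.filter_cons]
    have hstep : pvStepA (ins, acc) m
        = (if pvDictGetD m "content" "" ≠ "" then (ins, acc ++ [pvDictGetD m "content" ""]) else (ins, acc)) := by
      simp [pvStepA, h]
    by_cases hc : pvDictGetD m "content" "" = ""
    · rw [hstep, if_neg (by simp [hc]), ih _ _ h]; simp [hc]
    · rw [hstep, if_pos (by simp [hc]), ih _ _ h]; simp [hc]

-- any index found in an enumeration starting at t is ≥ t
lemma find?_enumerate_ge {α : Type} (xs : List α) (t : Int) (f : Int × α → Bool) (p : Int × α)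
    (h : (PySem.List.enumerate xs t).find? f = some p) : t ≤ p.1 := by
  have hm := List.mem_of_find?_eq_some h
  rw [PySem.List.mem_enumerate_iff] at hm
  obtain ⟨k, hk, rfl⟩ := hm
  show t ≤ t + (k : Int)
  omega

-- a filterMap that excludes one index below the enumeration start is a plain filter
lemma filterMap_enum_ne (xs : List String) : ∀ (t j : Int), j < t →
    (PySem.List.enumerate xs t).filterMap (fun p => if ¬p.2 = "" ∧ ¬p.1 = j then some p.2 else none)
      = xs.filter (fun c => !decide (c = "")) := by
  induction xs with
  | nil => intros; simp [PySem.List.enumerate_nil]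
  | cons x xs ih =>
    intro t j hj
    rw [PySem.List.enumerate_cons]
    simp only [List.filterMap_cons, List.filter_cons]
    rw [ih (t + 1) j (by omega)]
    have htj : ¬t = j := by omega
    by_cases hx : x = "" <;> simp [hx, htj]

-- main invariant: A's fold from an empty instruction computes B's decomposition, at any offset
lemma foldA_main (msgs : List (List (String × String))) :
    ∀ (s : Int) (acc : List String),
    msgs.foldl pvStepA ("", acc)
      = (let contents := msgs.map (fun m => pvDictGetD m "content" "")
         let hit := (PySem.List.enumerate (msgs.zip contents) s).find?
            (fun p => (pvDictGet? p.2.1 "role" == some "user") && (p.2.2 != ""))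
         let idx : Option Int := hit.map (·.1)
         ((hit.map (·.2.2)).getD "",
          acc ++ (PySem.List.enumerate contents s).filterMap
            (fun p => if p.2 ≠ "" ∧ some p.1 ≠ idx then some p.2 else none))) := by
  induction msgs with
  | nil => intro s acc; simp [PySem.List.enumerate_nil]
  | cons m ms ih =>
    intro s acc
    simp only [List.map_cons, List.zip_cons_cons, PySem.List.enumerate_cons,
      List.foldl_cons, List.filterMap_cons, List.find?_cons]
    by_cases hpred : (pvDictGet? m "role" == some "user" && pvDictGetD m "content" "" != "") = true
    · -- head is the hit
      have hrole : pvDictGet? m "role" = some "user" := by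
        simp at hpred; exact hpred.1
      have hcne : pvDictGetD m "content" "" ≠ "" := by
        simp at hpred; exact hpred.2
      simp only [hpred]
      rw [show pvStepA ("", acc) m = (pvDictGetD m "content" "", acc) by simp [pvStepA, hrole]]
      rw [foldA_of_ne ms _ acc hcne]
      simp only [Option.map_some, Option.getD_some]
      simp [filterMap_enum_ne (List.map (fun m => pvDictGetD m "content" "") ms) (s + 1) s (by omega)]
    · -- head is not the hit
      simp only [Bool.not_eq_true] at hpred
      simp only [hpred]
      have hstep : pvStepA ("", acc) m
          = (if pvDictGetD m "content" "" ≠ "" then ("", acc ++ [pvDictGetD m "content" ""]) else ("", acc)) := by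
        by_cases hrole : pvDictGet? m "role" = some "user"
        · have hcz : pvDictGetD m "content" "" = "" := by
            by_contra hcn
            simp [hrole, hcn] at hpred
          simp [pvStepA, hrole, hcz]
        · simp [pvStepA, hrole]
      set hitT := (PySem.List.enumerate (ms.zip (ms.map (fun m => pvDictGetD m "content" ""))) (s + 1)).find?
          (fun p => (pvDictGet? p.2.1 "role" == some "user") && (p.2.2 != "")) with hhit
      have hsne : ∀ (j : Int × (List (String × String)) × String), hitT = some j → some s ≠ some j.1 := by
        intro j hj he
        have := find?_enumerate_ge _ _ _ _ hj
        cases he; omega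
      rw [hstep]
      by_cases hcz : pvDictGetD m "content" "" = ""
      · rw [if_neg (by simp [hcz]), ih (s + 1) acc]
        simp only [← hhit]
        simp [hcz]
      · rw [if_pos (by simp [hcz]), ih (s + 1) (acc ++ [pvDictGetD m "content" ""])]
        simp only [← hhit]
        cases h : hitT with
        | none => simp [hcz]
        | some j => simp [hcz, hsne j h]

-- ===== VERDICT (by name: the statement is the Claim_ definition above) =====
theorem first_user_message_py_spec : Claim_equal_first_user_message_py := by
  intro messages _
  show first_user_message_py messages = first_user_message_py_alt messages
  unfold first_user_message_py first_user_message_py_alt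
  cases messages with
  | nil => simp [PySem.List.enumerate_nil, PySem.Str.join]
  | cons m ms =>
    simp only [if_neg (List.cons_ne_nil m ms)]
    rw [foldA_main (m :: ms) 0 []]
    rfl
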